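-- pv_equiv track=rewrite | github.com/Jasson-01/UBA-IP-2024 | Parciales/Parcial-3/SolucionParcial3.py | seguidilla
-- ===== SOURCE A (Python) =====
-- def sinRepetidos(lista:list)->list:
--     nueva:list = []
--     for i in range(len(lista)):
--         if lista[i] not in nueva:
--             nueva.append(lista[i])
--     return nueva
--
-- def seguidilla(calificaciones:list[int],nota_minima:int)->int:
--     notas_mayores:list[int] = []
--     for i in range(len(calificaciones)):
--         if calificaciones[i] > nota_minima :
--             notas_mayores.append(calificaciones[i])
--
--     if len(sinRepetidos(notas_mayores)) > 0 :
--         return len(sinRepetidos(notas_mayores))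
--     return 0
-- ===== SOURCE B (Python) =====
-- def seguidilla(calificaciones: list[int], nota_minima: int) -> int:
--     mayores = sorted(c for c in calificaciones if c > nota_minima)
--     if not mayores:
--         return 0
--     cuenta = 1
--     for i in range(1, len(mayores)):
--         if mayores[i] != mayores[i - 1]:
--             cuenta += 1
--     return cuenta
-- ===== Notes on version B (the rewrite author's own statement) =====
-- stated objective: faster
-- what changed: Replaces the quadratic membership-scan dedup (run twice) of the filtered grades with one sort of the filtered grades followed by a single adjacent-difference pass that counts distinct values.
import Mathlib
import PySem

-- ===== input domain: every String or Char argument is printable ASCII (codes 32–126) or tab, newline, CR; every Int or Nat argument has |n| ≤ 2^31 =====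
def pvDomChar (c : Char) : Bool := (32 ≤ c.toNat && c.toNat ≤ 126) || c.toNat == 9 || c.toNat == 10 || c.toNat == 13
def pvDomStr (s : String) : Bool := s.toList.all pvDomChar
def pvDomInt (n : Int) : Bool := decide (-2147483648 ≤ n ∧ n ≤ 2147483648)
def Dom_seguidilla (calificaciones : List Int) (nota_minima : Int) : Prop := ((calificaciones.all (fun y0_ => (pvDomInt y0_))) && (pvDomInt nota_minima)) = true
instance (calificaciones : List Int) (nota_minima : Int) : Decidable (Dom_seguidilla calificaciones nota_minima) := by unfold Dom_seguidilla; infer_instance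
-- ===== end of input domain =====

-- B replaces A's double quadratic membership-scan dedup with sort + one adjacent-difference pass (faster).
-- ===== PORT A =====
def sinRepetidosPort (lista : List Int) : List Int :=
  (PySem.List.pyRange 0 lista.length 1).foldl
    (fun nueva i =>
      if PySem.List.pyGetD lista i 0 ∈ nueva then nueva
      else nueva ++ [PySem.List.pyGetD lista i 0]) []

def notasMayoresPort (calificaciones : List Int) (nota_minima : Int) : List Int :=
  (PySem.List.pyRange 0 calificaciones.length 1).foldl
    (fun acc i =>
      if PySem.List.pyGetD calificaciones i 0 > nota_minima then
        acc ++ [PySem.List.pyGetD calificaciones i 0]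
      else acc) []

def seguidilla (calificaciones : List Int) (nota_minima : Int) : Int :=
  if (sinRepetidosPort (notasMayoresPort calificaciones nota_minima)).length > 0 then
    ((sinRepetidosPort (notasMayoresPort calificaciones nota_minima)).length : Int)
  else 0

-- ===== PORT B =====
-- loop 'for i in range(1, len(mayores)): if mayores[i] != mayores[i-1]: cuenta += 1'
-- as structural recursion carrying the previous element and the counter
def seguidillaAltGo (prev : Int) (rest : List Int) (cuenta : Int) : Int :=
  match rest with
  | [] => cuenta
  | x :: t => seguidillaAltGo x t (if x ≠ prev then cuenta + 1 else cuenta)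

def seguidilla_alt (calificaciones : List Int) (nota_minima : Int) : Int :=
  match PySem.List.sorted (calificaciones.filter (fun c => c > nota_minima)) (fun x => x) false with
  | [] => 0
  | x :: t => seguidillaAltGo x t 1

-- ===== PRECONDITION & SPEC =====
def Spec_seguidilla (calificaciones : List Int) (nota_minima : Int) (out : Int) : Prop := out = seguidilla_alt calificaciones nota_minima
instance (calificaciones : List Int) (nota_minima : Int) (out : Int) : Decidable (Spec_seguidilla calificaciones nota_minima out) := by unfold Spec_seguidilla; infer_instance

-- ===== CLAIM (what is proved, stated in full; the proofs are below) =====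
def Claim_equal_seguidilla : Prop := ∀ (calificaciones : List Int) (nota_minima : Int), Dom_seguidilla calificaciones nota_minima → Spec_seguidilla calificaciones nota_minima (seguidilla calificaciones nota_minima)

-- ===== LEMMAS AND PROOFS =====

-- A's inner dedup loop: the accumulator stays nodup and collects the finset of seen values
theorem dedup_foldl_card (l : List Int) :
    ∀ acc : List Int, acc.Nodup →
      (l.foldl (fun nueva v => if v ∈ nueva then nueva else nueva ++ [v]) acc).length
        = (acc.toFinset ∪ l.toFinset).card := by
  induction l with
  | nil =>
    intro acc hacc
    simp [List.toFinset_card_of_nodup hacc]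
  | cons x t ih =>
    intro acc hacc
    by_cases hx : x ∈ acc
    · simp only [List.foldl_cons, if_pos hx]
      rw [ih acc hacc]
      congr 1
      ext y
      simp only [Finset.mem_union, List.toFinset_cons, Finset.mem_insert, List.mem_toFinset]
      constructor
      · rintro (h | h) <;> tauto
      · rintro (h | rfl | h) <;> tauto
    · simp only [List.foldl_cons, if_neg hx]
      rw [ih (acc ++ [x]) (by
        refine hacc.append (List.nodup_singleton x) ?_
        intro a ha hb
        rw [List.mem_singleton] at hb
        subst hb
        exact hx ha)]
      congr 1
      ext y
      simp only [Finset.mem_union, List.toFinset_append, List.toFinset_cons, Finset.mem_insert,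
        List.mem_toFinset, List.toFinset_nil]
      tauto

theorem sinRepetidosPort_length (l : List Int) :
    (sinRepetidosPort l).length = l.toFinset.card := by
  unfold sinRepetidosPort
  rw [PySem.List.foldl_pyRange_zero_pyGetD' l 0
    (fun nueva v => if v ∈ nueva then nueva else nueva ++ [v]) []]
  rw [dedup_foldl_card l [] List.nodup_nil]
  simp

theorem seguidilla_eq_card (calificaciones : List Int) (nota_minima : Int) :
    seguidilla calificaciones nota_minima
      = ((calificaciones.filter (fun c => c > nota_minima)).toFinset.card : Int) := by
  have hnm : notasMayoresPort calificaciones nota_minima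
      = calificaciones.filter (fun c => c > nota_minima) := by
    unfold notasMayoresPort
    rw [PySem.List.foldl_pyRange_zero_pyGetD' calificaciones 0
      (fun acc v => if v > nota_minima then acc ++ [v] else acc) []]
    have hfe : (fun (acc : List Int) v => if v > nota_minima then acc ++ [v] else acc)
        = fun acc v => if decide (v > nota_minima) = true then acc ++ [v] else acc := by
      funext acc v
      simp
    rw [hfe, PySem.List.foldl_append_if (fun v => decide (v > nota_minima)) (fun v => v)]
    simp
  unfold seguidilla
  rw [hnm, sinRepetidosPort_length]
  split_ifs with h
  · rfl
  · omega

-- B's pass: with the tail sorted after prev, the counter advances by the number of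
-- distinct values in the tail other than prev
theorem seguidillaAltGo_card (t : List Int) :
    ∀ (prev cuenta : Int), (prev :: t).Pairwise (· ≤ ·) →
      seguidillaAltGo prev t cuenta = cuenta + ((t.toFinset.erase prev).card : Int) := by
  induction t with
  | nil => intro prev cuenta _; simp [seguidillaAltGo]
  | cons x t ih =>
    intro prev cuenta hp
    have hpx : prev ≤ x := (List.pairwise_cons.mp hp).1 x (by simp)
    have hxt : (x :: t).Pairwise (· ≤ ·) := (List.pairwise_cons.mp hp).2
    by_cases hne : x = prev
    · subst hne
      simp only [seguidillaAltGo, ne_eq, not_true_eq_false, if_false]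
      rw [ih x cuenta hxt, List.toFinset_cons, Finset.erase_insert_eq_erase]
    · simp only [seguidillaAltGo, ne_eq, hne, not_false_eq_true, if_true]
      rw [ih x (cuenta + 1) hxt]
      have hprevt : prev ∉ t := by
        intro hmem
        have h1 : x ≤ prev := (List.pairwise_cons.mp hxt).1 prev hmem
        exact hne (le_antisymm h1 hpx)
      have hpout : prev ∉ insert x t.toFinset := by
        simp only [Finset.mem_insert, List.mem_toFinset]
        rintro (rfl | h)
        · exact hne rfl
        · exact hprevt h
      rw [List.toFinset_cons, Finset.erase_eq_of_notMem hpout]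
      have hins : insert x t.toFinset = insert x (t.toFinset.erase x) := by
        ext y
        simp only [Finset.mem_insert, Finset.mem_erase]
        constructor
        · rintro (rfl | h)
          · exact Or.inl rfl
          · by_cases hyx : y = x
            · exact Or.inl hyx
            · exact Or.inr ⟨hyx, h⟩
        · rintro (rfl | ⟨_, h⟩)
          · exact Or.inl rfl
          · exact Or.inr h
      rw [hins, Finset.card_insert_of_notMem (Finset.notMem_erase x _)]
      push_cast
      ring

theorem seguidilla_alt_eq_card (calificaciones : List Int) (nota_minima : Int) :
    seguidilla_alt calificaciones nota_minima
      = ((calificaciones.filter (fun c => c > nota_minima)).toFinset.card : Int) := by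
  have hperm := PySem.List.sorted_perm (calificaciones.filter (fun c => c > nota_minima))
    (fun x => x) false
  have hfin : (PySem.List.sorted (calificaciones.filter (fun c => c > nota_minima))
      (fun x => x) false).toFinset = (calificaciones.filter (fun c => c > nota_minima)).toFinset :=
    Finset.ext fun a => by simp [List.mem_toFinset, hperm.mem_iff]
  cases hs : PySem.List.sorted (calificaciones.filter (fun c => c > nota_minima)) (fun x => x) false with
  | nil =>
    rw [hs] at hfin
    simp [seguidilla_alt, hs, ← hfin]
  | cons x t =>
    have hpw : (x :: t).Pairwise (· ≤ ·) := by
      have := PySem.List.sorted_pairwise (calificaciones.filter (fun c => c > nota_minima))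
        (fun x => x)
      rw [hs] at this
      exact this
    rw [hs] at hfin
    simp only [seguidilla_alt, hs]
    rw [seguidillaAltGo_card t x 1 hpw, ← hfin]
    have hxout : x ∉ (t.toFinset.erase x) := Finset.notMem_erase x _
    have hins : insert x t.toFinset = insert x (t.toFinset.erase x) := by
      ext y
      simp only [Finset.mem_insert, Finset.mem_erase]
      constructor
      · rintro (rfl | h)
        · exact Or.inl rfl
        · by_cases hyx : y = x
          · exact Or.inl hyx
          · exact Or.inr ⟨hyx, h⟩
      · rintro (rfl | ⟨_, h⟩)
        · exact Or.inl rfl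
        · exact Or.inr h
    rw [List.toFinset_cons, hins, Finset.card_insert_of_notMem hxout]
    push_cast
    ring

-- ===== VERDICT (by name: the statement is the Claim_ definition above) =====
theorem seguidilla_spec : Claim_equal_seguidilla := by
  intro calificaciones nota_minima _
  unfold Spec_seguidilla
  rw [seguidilla_eq_card, seguidilla_alt_eq_card]
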